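-- pv_equiv track=rewrite | github.com/stefanandonov/log2graph | core-library/src/utils/graphs_util.py | create_position_embeddings
-- ===== SOURCE A (Python) =====
-- def create_position_embeddings(event_ids: list, include_last: bool) -> dict:
--     """
--     Method that creates the position embeddings for the event_ids. The position embeddings represent numerical information
--     for the order of occurrence of the event IDs in a log sequence (session). The last event_id detected in the session
--     has embedding of 1 and the first event_id in the sequence has the embedding N where N is the count of unique event
--     IDs in the sequence
--     :param event_ids: List of the event ids extracted from the logs that occurred in a given window/session
--     :param include_last: A bool value that represents whether the last event ID should be included in the graph generation
--     :return: dictionary where the keys are the event IDs and the values are the corresponding position embeddings for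
--     the key
--     """
--     end = len(event_ids) if include_last else len(event_ids) - 1
--     embeddings = {event_id: 0 for event_id in event_ids[:end]}
--     counter = 1
--     for event_id in reversed(event_ids[:end]):
--         if embeddings[event_id] == 0:
--             embeddings[event_id] = counter
--         counter += 1
--     return embeddings
-- ===== SOURCE B (Python) =====
-- def create_position_embeddings(event_ids: list, include_last: bool) -> dict:
--     end = len(event_ids) if include_last else len(event_ids) - 1
--     embeddings = {}
--     for idx, event_id in enumerate(event_ids[:end]):
--         embeddings[event_id] = end - idx
--     return embeddings
-- ===== Notes on version B (the rewrite author's own statement) =====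
-- stated objective: simpler
-- what changed: A zero-initialises a dict over the slice and then walks it in reverse with a counter, conditionally writing each key's first reversed position; B does one forward pass over the slice, unconditionally overwriting each key with end - index, so the last occurrence wins and yields the same value with one loop and no counter or conditional.
import Mathlib
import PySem

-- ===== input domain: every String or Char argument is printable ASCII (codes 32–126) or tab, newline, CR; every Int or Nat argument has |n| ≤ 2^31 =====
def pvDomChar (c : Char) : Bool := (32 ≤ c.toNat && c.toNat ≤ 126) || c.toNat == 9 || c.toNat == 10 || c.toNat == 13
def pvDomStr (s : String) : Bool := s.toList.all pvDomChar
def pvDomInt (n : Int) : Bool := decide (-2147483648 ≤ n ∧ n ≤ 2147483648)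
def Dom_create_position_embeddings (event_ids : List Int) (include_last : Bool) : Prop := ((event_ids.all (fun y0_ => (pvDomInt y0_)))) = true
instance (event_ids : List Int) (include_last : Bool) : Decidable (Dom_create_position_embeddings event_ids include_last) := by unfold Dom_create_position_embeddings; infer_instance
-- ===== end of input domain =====

-- B replaces A's zero-init dict plus reversed counter loop with a single forward
-- pass that overwrites each key with `end - idx` (objective: simpler).

-- ===== PORT A =====
-- the reversed loop carries the pair (embeddings, counter); `embeddings[event_id]`
-- is ported as getD _ 0, exact here because every looped element is a key of the
-- zero-initialised dict
def create_position_embeddings (event_ids : List Int) (include_last : Bool) : List (Int × Int) :=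
  let e : Int := if include_last then (event_ids.length : Int) else (event_ids.length : Int) - 1
  let xs := PySem.List.slice event_ids none (some e)
  let embeddings : PySem.Dict Int Int := xs.foldl (fun d x => d.insert x 0) PySem.Dict.empty
  let r := xs.reverse.foldl
    (fun (p : PySem.Dict Int Int × Int) x =>
      (if p.1.getD x 0 == 0 then p.1.insert x p.2 else p.1, p.2 + 1))
    (embeddings, 1)
  r.1.items

-- ===== PORT B =====
def create_position_embeddings_alt (event_ids : List Int) (include_last : Bool) : List (Int × Int) :=
  let e : Int := if include_last then (event_ids.length : Int) else (event_ids.length : Int) - 1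
  let d := (PySem.List.enumerate (PySem.List.slice event_ids none (some e)) 0).foldl
    (fun d p => d.insert p.2 (e - p.1)) PySem.Dict.empty
  d.items

-- ===== PRECONDITION & SPEC =====
def Spec_create_position_embeddings (event_ids : List Int) (include_last : Bool) (out : List (Int × Int)) : Prop := out = create_position_embeddings_alt event_ids include_last
instance (event_ids : List Int) (include_last : Bool) (out : List (Int × Int)) : Decidable (Spec_create_position_embeddings event_ids include_last out) := by unfold Spec_create_position_embeddings; infer_instance

-- ===== CLAIM (what is proved, stated in full; the proofs are below) =====
def Claim_equal_create_position_embeddings : Prop := ∀ (event_ids : List Int) (include_last : Bool), Dom_create_position_embeddings event_ids include_last → Spec_create_position_embeddings event_ids include_last (create_position_embeddings event_ids include_last)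

-- ===== LEMMAS AND PROOFS =====

-- the zero-initialising loop of A leaves every value at 0
lemma getD_zero_init (xs : List Int) (d : PySem.Dict Int Int) (k : Int)
    (h : d.getD k 0 = 0) :
    (xs.foldl (fun d x => d.insert x 0) d).getD k 0 = 0 := by
  induction xs generalizing d with
  | nil => exact h
  | cons y ys ih =>
    simp only [List.foldl_cons]
    exact ih _ (by rw [PySem.Dict.getD_insert]; split <;> simp [h])

-- lookup after A's reversed counter loop: the first occurrence (in loop order)
-- of a still-zero key receives the counter value
lemma getD_loopA (ys : List Int) (d : PySem.Dict Int Int) (c : Int) (k : Int)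
    (hc : 0 < c) :
    ((ys.foldl (fun (p : PySem.Dict Int Int × Int) x =>
        (if p.1.getD x 0 == 0 then p.1.insert x p.2 else p.1, p.2 + 1)) (d, c)).1).getD k 0 =
      if d.getD k 0 = 0 ∧ k ∈ ys then c + (ys.idxOf k : Int) else d.getD k 0 := by
  simp only [beq_iff_eq]
  induction ys generalizing d c with
  | nil => simp
  | cons y ys ih =>
    simp only [List.foldl_cons]
    by_cases hy : d.getD y 0 = 0
    · rw [if_pos hy, ih _ _ (by omega)]
      by_cases hk : k = y
      · subst hk
        have h1 : (d.insert k c).getD k 0 = c := PySem.Dict.getD_insert_self ..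
        rw [h1, if_neg (by rintro ⟨h0, _⟩; omega),
          if_pos ⟨hy, by simp⟩, List.idxOf_cons_self]
        simp
      · have h2 : (d.insert y c).getD k 0 = d.getD k 0 :=
          PySem.Dict.getD_insert_of_ne _ _ _ hk
        rw [h2]
        by_cases hm : d.getD k 0 = 0 ∧ k ∈ ys
        · rw [if_pos hm, if_pos ⟨hm.1, by simp [hm.2]⟩,
            List.idxOf_cons_ne _ (Ne.symm hk)]
          push_cast
          omega
        · rw [if_neg hm, if_neg (by
            simp only [List.mem_cons]
            rintro ⟨h0, (h | h)⟩
            · exact hk h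
            · exact hm ⟨h0, h⟩)]
    · rw [if_neg hy, ih _ _ (by omega)]
      by_cases hk : k = y
      · subst hk
        simp [hy]
      · by_cases hm : d.getD k 0 = 0 ∧ k ∈ ys
        · rw [if_pos hm, if_pos ⟨hm.1, by simp [hm.2]⟩,
            List.idxOf_cons_ne _ (Ne.symm hk)]
          push_cast
          omega
        · rw [if_neg hm, if_neg (by
            simp only [List.mem_cons]
            rintro ⟨h0, (h | h)⟩
            · exact hk h
            · exact hm ⟨h0, h⟩)]

-- A's reversed loop only writes to keys the dict already has, so the key list is unchanged
lemma keys_loopA (ys : List Int) (d : PySem.Dict Int Int) (c : Int)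
    (h : ∀ x ∈ ys, x ∈ d.keys) :
    ((ys.foldl (fun (p : PySem.Dict Int Int × Int) x =>
        (if p.1.getD x 0 == 0 then p.1.insert x p.2 else p.1, p.2 + 1)) (d, c)).1).keys = d.keys := by
  simp only [beq_iff_eq]
  induction ys generalizing d c with
  | nil => rfl
  | cons y ys ih =>
    simp only [List.foldl_cons]
    by_cases hy : d.getD y 0 = 0
    · rw [if_pos hy]
      have hk : (d.insert y c).keys = d.keys :=
        PySem.Dict.keys_insert_of_contains _ _
          ((PySem.Dict.contains_iff_mem_keys _ _).mpr (h y (by simp)))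
      rw [ih (d.insert y c) (c + 1) (fun x hx => by rw [hk]; exact h x (by simp [hx])), hk]
    · rw [if_neg hy]
      exact ih d (c + 1) (fun x hx => h x (by simp [hx]))

-- lookup after B's forward enumerate loop: the last occurrence wins
lemma getD_loopB (e : Int) (xs : List Int) (i : Int) (d : PySem.Dict Int Int) (k : Int) :
    ((PySem.List.enumerate xs i).foldl (fun d p => d.insert p.2 (e - p.1)) d).getD k 0 =
      if k ∈ xs then e - (i + ((xs.length - 1 - xs.reverse.idxOf k : Nat) : Int))
      else d.getD k 0 := by
  induction xs generalizing i d with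
  | nil => simp [PySem.List.enumerate_nil]
  | cons x xs ih =>
    rw [PySem.List.enumerate_cons]
    simp only [List.foldl_cons, List.reverse_cons, List.length_cons]
    rw [ih]
    by_cases hk : k = x
    · subst hk
      by_cases hm : k ∈ xs
      · have hr : (xs.reverse ++ [k]).idxOf k = xs.reverse.idxOf k :=
          List.idxOf_append_of_mem (by simpa using hm)
        have hb : xs.reverse.idxOf k < xs.length := by
          simpa using List.idxOf_lt_length_of_mem (l := xs.reverse) (by simpa using hm)
        simp only [hm, if_true, List.mem_cons, true_or, hr]
        omega
      · have hr : (xs.reverse ++ [k]).idxOf k = xs.length := by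
          rw [List.idxOf_append, if_neg (by simpa using hm)]
          simp
        simp only [hm, if_false, List.mem_cons, true_or, if_true, hr,
          PySem.Dict.getD_insert_self]
        omega
    · have h2 : ∀ v, (d.insert x v).getD k 0 = d.getD k 0 :=
        fun v => PySem.Dict.getD_insert_of_ne _ _ _ hk
      by_cases hm : k ∈ xs
      · have hr : (xs.reverse ++ [x]).idxOf k = xs.reverse.idxOf k :=
          List.idxOf_append_of_mem (by simpa using hm)
        have hb : xs.reverse.idxOf k < xs.length := by
          simpa using List.idxOf_lt_length_of_mem (l := xs.reverse) (by simpa using hm)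
        simp only [hm, if_true, List.mem_cons, or_true, hr]
        omega
      · have hm' : ¬ k ∈ x :: xs := by simp [hk, hm]
        simp [hm, hm', h2]

-- the core equality, on the sliced list: A's two passes agree with B's single pass
lemma core_eq (xs : List Int) (e : Int) (he : e = (xs.length : Int)) :
    ((xs.reverse.foldl (fun (p : PySem.Dict Int Int × Int) x =>
        (if p.1.getD x 0 == 0 then p.1.insert x p.2 else p.1, p.2 + 1))
      (xs.foldl (fun d x => d.insert x 0) PySem.Dict.empty, 1)).1).items =
    ((PySem.List.enumerate xs 0).foldl (fun d p => d.insert p.2 (e - p.1))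
      PySem.Dict.empty).items := by
  subst he
  have hkeys0 : (xs.foldl (fun d x => d.insert x (0 : Int)) PySem.Dict.empty).keys =
      PySem.Set.update (PySem.Dict.empty : PySem.Dict Int Int).keys xs :=
    PySem.Dict.keys_foldl_insert xs (fun _ _ => 0) _
  have hmem0 : ∀ x ∈ xs, x ∈ (xs.foldl (fun d x => d.insert x (0 : Int)) PySem.Dict.empty).keys := by
    intro x hx
    rw [hkeys0]
    simp only [PySem.Dict.keys_empty, PySem.Set.update] at *
    have : x ∈ PySem.Set.ofList xs := (PySem.Set.mem_ofList _ _).mpr hx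
    rwa [PySem.Set.ofList_eq_foldl] at this
  have hkA : ((xs.reverse.foldl (fun (p : PySem.Dict Int Int × Int) x =>
        (if p.1.getD x 0 == 0 then p.1.insert x p.2 else p.1, p.2 + 1))
      (xs.foldl (fun d x => d.insert x 0) PySem.Dict.empty, 1)).1).keys =
      PySem.Set.update (PySem.Dict.empty : PySem.Dict Int Int).keys xs := by
    rw [keys_loopA _ _ _ (fun x hx => hmem0 x (by simpa using hx)), hkeys0]
  have hkB : ((PySem.List.enumerate xs 0).foldl (fun d p => d.insert p.2 ((xs.length : Int) - p.1))
      PySem.Dict.empty).keys = PySem.Set.update (PySem.Dict.empty : PySem.Dict Int Int).keys xs := by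
    rw [PySem.Dict.keys_foldl_insert_key (PySem.List.enumerate xs 0) (·.2) _ _,
      PySem.List.map_snd_enumerate]
  have hndA : ((xs.reverse.foldl (fun (p : PySem.Dict Int Int × Int) x =>
        (if p.1.getD x 0 == 0 then p.1.insert x p.2 else p.1, p.2 + 1))
      (xs.foldl (fun d x => d.insert x 0) PySem.Dict.empty, 1)).1).keys.Nodup := by
    rw [hkA]
    simp only [PySem.Dict.keys_empty, PySem.Set.update]
    rw [← PySem.Set.ofList_eq_foldl]
    exact PySem.Set.nodup_ofList xs
  have hndB : ((PySem.List.enumerate xs 0).foldl (fun d p => d.insert p.2 ((xs.length : Int) - p.1))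
      PySem.Dict.empty).keys.Nodup := by
    rw [hkB]
    simp only [PySem.Dict.keys_empty, PySem.Set.update]
    rw [← PySem.Set.ofList_eq_foldl]
    exact PySem.Set.nodup_ofList xs
  rw [PySem.Dict.items_eq_map_keys _ hndA 0, PySem.Dict.items_eq_map_keys _ hndB 0, hkA, hkB]
  apply List.map_congr_left
  intro k hk
  have hkx : k ∈ xs := by
    simp only [PySem.Dict.keys_empty, PySem.Set.update] at hk
    rw [← PySem.Set.ofList_eq_foldl] at hk
    exact (PySem.Set.mem_ofList _ _).mp hk
  have hz : (xs.foldl (fun d x => d.insert x (0 : Int)) PySem.Dict.empty).getD k 0 = 0 :=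
    getD_zero_init xs _ k (by simp)
  rw [getD_loopA _ _ _ _ (by omega), getD_loopB]
  have hb : xs.reverse.idxOf k < xs.length := by
    simpa using List.idxOf_lt_length_of_mem (l := xs.reverse) (by simpa using hkx)
  simp only [hz, hkx, List.mem_reverse, true_and, if_true, Prod.mk.injEq]
  omega

-- ===== VERDICT (by name: the statement is the Claim_ definition above) =====
theorem create_position_embeddings_spec : Claim_equal_create_position_embeddings := by
  intro event_ids include_last _
  unfold Spec_create_position_embeddings create_position_embeddings create_position_embeddings_alt
  cases include_last with
  | true =>
    simp only [if_true]
    rw [PySem.List.slice_to_natCast]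
    rw [List.take_length]
    exact core_eq event_ids _ rfl
  | false =>
    simp only [if_false, Bool.false_eq_true]
    cases event_ids with
    | nil =>
      decide
    | cons y ys =>
      have h1 : ((y :: ys).length : Int) - 1 = (((y :: ys).length - 1 : Nat) : Int) := by
        simp
      rw [h1, PySem.List.slice_to_natCast]
      have h2 : (y :: ys).take ((y :: ys).length - 1) = (y :: ys).dropLast := by
        rw [List.dropLast_eq_take]
      rw [h2]
      exact core_eq _ _ (by simp [List.length_dropLast])
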